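-- pv_equiv track=rewrite | github.com/cede87/pdac-trial-atlas | scripts/ingest_clinicaltrials.py | _score_therapeutic_class
-- ===== SOURCE A (Python) =====
-- def _score_therapeutic_class(
--     existing: str,
--     focus_tags: str,
--     mesh_terms: list[str],
-- ) -> str:
--     existing_norm = (existing or "").strip().lower()
--     scores = {}
--
--     if existing_norm and existing_norm not in {"unknown", "context_classified", "na"}:
--         scores[existing_norm] = scores.get(existing_norm, 0) + 2
--
--     tag_text = " ".join([t.strip() for t in (focus_tags or "").split(",") if t.strip()]).lower()
--     mesh_text = " ".join(mesh_terms or []).lower()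
--     combined = f"{tag_text} {mesh_text}".strip()
--
--     tag_to_class = {
--         "biomarker": "biomarker_diagnostics",
--         "early_detection": "biomarker_diagnostics",
--         "imaging_diagnostics": "biomarker_diagnostics",
--         "liquid_biopsy": "biomarker_diagnostics",
--         "genomics_precision": "targeted_therapy",
--         "supportive_outcomes": "supportive_care",
--         "locoregional_procedure": "locoregional_therapy",
--         "registry_real_world": "registry_program",
--     }
--     for tag in (focus_tags or "").split(","):
--         key = tag.strip().lower()
--         if key in tag_to_class:
--             cls = tag_to_class[key]
--             scores[cls] = scores.get(cls, 0) + 1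
--
--     mesh_signals = {
--         "chemotherapy": ["chemotherapy", "antineoplastic"],
--         "immunotherapy": ["immunotherapy", "immune checkpoint", "vaccines"],
--         "targeted_therapy": ["molecular targeted", "protein kinase", "parp", "egfr", "kras", "braf", "inhibitor"],
--         "radiotherapy": ["radiotherapy", "radiation"],
--         "surgical": ["surgery", "surgical procedures", "pancreatectomy", "resection"],
--         "locoregional_therapy": ["ablation", "electroporation", "embolization", "intra-arterial"],
--         "supportive_care": ["palliative care", "quality of life", "pain", "supportive care"],
--         "biomarker_diagnostics": ["biomarker", "diagnostic", "screening", "early detection", "imaging"],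
--     }
--     for cls, terms in mesh_signals.items():
--         if any(term in combined for term in terms):
--             scores[cls] = scores.get(cls, 0) + 2
--
--     if not scores:
--         return existing_norm or "context_classified"
--
--     max_score = max(scores.values())
--     candidates = {cls for cls, score in scores.items() if score == max_score}
--     priority = [
--         "locoregional_therapy",
--         "surgical",
--         "radiotherapy",
--         "immunotherapy",
--         "targeted_therapy",
--         "chemotherapy",
--         "supportive_care",
--         "biomarker_diagnostics",
--         "registry_program",
--     ]
--     for cls in priority:
--         if cls in candidates:
--             return cls
--     return sorted(candidates)[0]
-- ===== SOURCE B (Python) =====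
-- PRIORITY = [
--     "locoregional_therapy",
--     "surgical",
--     "radiotherapy",
--     "immunotherapy",
--     "targeted_therapy",
--     "chemotherapy",
--     "supportive_care",
--     "biomarker_diagnostics",
--     "registry_program",
-- ]
--
-- TAG_CLASS = {
--     "biomarker": "biomarker_diagnostics",
--     "early_detection": "biomarker_diagnostics",
--     "imaging_diagnostics": "biomarker_diagnostics",
--     "liquid_biopsy": "biomarker_diagnostics",
--     "genomics_precision": "targeted_therapy",
--     "supportive_outcomes": "supportive_care",
--     "locoregional_procedure": "locoregional_therapy",
--     "registry_real_world": "registry_program",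
-- }
--
-- SIGNALS = {
--     "chemotherapy": ["chemotherapy", "antineoplastic"],
--     "immunotherapy": ["immunotherapy", "immune checkpoint", "vaccines"],
--     "targeted_therapy": ["molecular targeted", "protein kinase", "parp", "egfr", "kras", "braf", "inhibitor"],
--     "radiotherapy": ["radiotherapy", "radiation"],
--     "surgical": ["surgery", "surgical procedures", "pancreatectomy", "resection"],
--     "locoregional_therapy": ["ablation", "electroporation", "embolization", "intra-arterial"],
--     "supportive_care": ["palliative care", "quality of life", "pain", "supportive care"],
--     "biomarker_diagnostics": ["biomarker", "diagnostic", "screening", "early detection", "imaging"],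
-- }
--
--
-- def _score_therapeutic_class(
--     existing: str,
--     focus_tags: str,
--     mesh_terms: list[str],
-- ) -> str:
--     existing_norm = (existing or "").strip().lower()
--     valid = bool(existing_norm) and existing_norm not in ("unknown", "context_classified", "na")
--
--     tags = [t.strip() for t in (focus_tags or "").split(",")]
--     combined = (
--         " ".join(t for t in tags if t) + " " + " ".join(mesh_terms or [])
--     ).lower().strip()
--
--     def score(cls):
--         s = 2 if (valid and cls == existing_norm) else 0
--         s += sum(1 for t in tags if TAG_CLASS.get(t.lower()) == cls)
--         if any(term in combined for term in SIGNALS.get(cls, ())):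
--             s += 2
--         return s
--
--     cands = PRIORITY + ([existing_norm] if valid and existing_norm not in PRIORITY else [])
--     scored = [(c, score(c)) for c in cands]
--     top = max((s for _, s in scored), default=0)
--     if top == 0:
--         return existing_norm or "context_classified"
--
--     def rank(c):
--         return PRIORITY.index(c) if c in PRIORITY else len(PRIORITY)
--
--     return min((c for c, s in scored if s == top), key=rank)
-- ===== Notes on version B (the rewrite author's own statement) =====
-- stated objective: alternative
-- what changed: B replaces A's mutable score-dict built by three accumulation passes and its max/candidate-set/priority-scan/sorted-fallback selection with a direct per-class score function evaluated over a fixed candidate list (the nine known classes plus the normalised existing class) and a single min-by-priority-rank selection among the top scorers.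
import Mathlib
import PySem

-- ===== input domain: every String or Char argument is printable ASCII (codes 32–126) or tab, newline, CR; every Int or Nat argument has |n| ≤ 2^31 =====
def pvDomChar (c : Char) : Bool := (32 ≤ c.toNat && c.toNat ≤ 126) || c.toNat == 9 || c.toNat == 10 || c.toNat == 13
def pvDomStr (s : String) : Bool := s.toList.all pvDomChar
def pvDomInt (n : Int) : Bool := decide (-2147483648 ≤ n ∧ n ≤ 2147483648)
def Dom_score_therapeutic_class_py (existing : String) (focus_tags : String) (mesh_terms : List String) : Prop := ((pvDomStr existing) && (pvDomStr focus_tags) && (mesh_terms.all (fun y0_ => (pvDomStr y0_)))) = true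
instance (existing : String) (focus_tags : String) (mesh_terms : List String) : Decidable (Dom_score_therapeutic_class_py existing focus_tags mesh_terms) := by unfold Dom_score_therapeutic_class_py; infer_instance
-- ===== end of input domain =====

-- B replaces A's dict-of-scores + max/candidate-set/priority-scan selection by a direct per-class
-- score function over a fixed candidate list and a single min-by-rank selection (objective: alternative).

-- ===== PORT A =====
-- tag_to_class (a Python dict literal), as an association list (lookup = first match)
def pvTagToClassA : List (String × String) :=
  [("biomarker", "biomarker_diagnostics"),
   ("early_detection", "biomarker_diagnostics"),
   ("imaging_diagnostics", "biomarker_diagnostics"),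
   ("liquid_biopsy", "biomarker_diagnostics"),
   ("genomics_precision", "targeted_therapy"),
   ("supportive_outcomes", "supportive_care"),
   ("locoregional_procedure", "locoregional_therapy"),
   ("registry_real_world", "registry_program")]

-- mesh_signals (a Python dict literal iterated with .items()), in insertion order
def pvMeshSignalsA : List (String × List String) :=
  [("chemotherapy", ["chemotherapy", "antineoplastic"]),
   ("immunotherapy", ["immunotherapy", "immune checkpoint", "vaccines"]),
   ("targeted_therapy", ["molecular targeted", "protein kinase", "parp", "egfr", "kras", "braf", "inhibitor"]),
   ("radiotherapy", ["radiotherapy", "radiation"]),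
   ("surgical", ["surgery", "surgical procedures", "pancreatectomy", "resection"]),
   ("locoregional_therapy", ["ablation", "electroporation", "embolization", "intra-arterial"]),
   ("supportive_care", ["palliative care", "quality of life", "pain", "supportive care"]),
   ("biomarker_diagnostics", ["biomarker", "diagnostic", "screening", "early detection", "imaging"])]

def pvPriorityA : List String :=
  ["locoregional_therapy", "surgical", "radiotherapy", "immunotherapy", "targeted_therapy",
   "chemotherapy", "supportive_care", "biomarker_diagnostics", "registry_program"]

-- the body of A's tag loop ('for tag in (focus_tags or "").split(",")')
def pvTagStepA (d : PySem.Dict String Int) (tag : String) : PySem.Dict String Int :=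
  let key := PySem.Str.lower (PySem.Str.strip tag)
  match (pvTagToClassA.find? (fun p => p.1 == key)) with
  | some p => d.insert p.2 (d.getD p.2 0 + 1)
  | none => d

def score_therapeutic_class_py (existing : String) (focus_tags : String) (mesh_terms : List String) : String :=
  let existing_norm := PySem.Str.lower (PySem.Str.strip existing)
  let scores : PySem.Dict String Int := PySem.Dict.empty
  let scores :=
    if existing_norm ≠ "" ∧ ¬ (["unknown", "context_classified", "na"].contains existing_norm) then
      scores.insert existing_norm (scores.getD existing_norm 0 + 2)
    else scores
  -- split(",") with a nonempty separator never returns none, the .getD [] default is unreachable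
  let tag_text := PySem.Str.lower (PySem.Str.join " "
    ((((PySem.Str.split? focus_tags ",").getD []).map PySem.Str.strip).filter (fun t => t ≠ "")))
  let mesh_text := PySem.Str.lower (PySem.Str.join " " mesh_terms)
  let combined := PySem.Str.strip (PySem.Str.join " " [tag_text, mesh_text])
  let scores := ((PySem.Str.split? focus_tags ",").getD []).foldl pvTagStepA scores
  let scores := pvMeshSignalsA.foldl (fun (d : PySem.Dict String Int) p =>
    if p.2.any (fun term => PySem.Str.isIn term combined) then
      d.insert p.1 (d.getD p.1 0 + 2)
    else d) scores
  if scores.items = [] then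
    (if existing_norm ≠ "" then existing_norm else "context_classified")
  else
    -- max() on a nonempty list never raises; the .getD 0 default is unreachable
    let maxScore := (PySem.List.max? scores.values (fun v => v)).getD 0
    let candidates := PySem.Set.ofList ((scores.items.filter (fun p => p.2 == maxScore)).map Prod.fst)
    match pvPriorityA.find? (fun cls => PySem.Set.contains candidates cls) with
    | some cls => cls
    -- sorted(candidates)[0]: candidates is nonempty here, the .getD "" default is unreachable
    | none => ((PySem.List.pyGet? (PySem.List.sorted candidates (fun x => x) false) 0).getD "")

-- ===== PORT B =====
def pvPriorityB : List String :=
  ["locoregional_therapy", "surgical", "radiotherapy", "immunotherapy", "targeted_therapy",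
   "chemotherapy", "supportive_care", "biomarker_diagnostics", "registry_program"]

def pvTagClassB : List (String × String) :=
  [("biomarker", "biomarker_diagnostics"),
   ("early_detection", "biomarker_diagnostics"),
   ("imaging_diagnostics", "biomarker_diagnostics"),
   ("liquid_biopsy", "biomarker_diagnostics"),
   ("genomics_precision", "targeted_therapy"),
   ("supportive_outcomes", "supportive_care"),
   ("locoregional_procedure", "locoregional_therapy"),
   ("registry_real_world", "registry_program")]

def pvSignalsB : List (String × List String) :=
  [("chemotherapy", ["chemotherapy", "antineoplastic"]),
   ("immunotherapy", ["immunotherapy", "immune checkpoint", "vaccines"]),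
   ("targeted_therapy", ["molecular targeted", "protein kinase", "parp", "egfr", "kras", "braf", "inhibitor"]),
   ("radiotherapy", ["radiotherapy", "radiation"]),
   ("surgical", ["surgery", "surgical procedures", "pancreatectomy", "resection"]),
   ("locoregional_therapy", ["ablation", "electroporation", "embolization", "intra-arterial"]),
   ("supportive_care", ["palliative care", "quality of life", "pain", "supportive care"]),
   ("biomarker_diagnostics", ["biomarker", "diagnostic", "screening", "early detection", "imaging"])]

-- rank(c) = PRIORITY.index(c) if c in PRIORITY else len(PRIORITY)
def pvRankB (c : String) : Nat :=
  match PySem.List.index? pvPriorityB c with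
  | some i => i
  | none => pvPriorityB.length

-- score(cls): the per-class score computed directly
def pvScoreB (valid : Bool) (existing_norm : String) (tags : List String) (combined : String)
    (cls : String) : Int :=
  (if valid && (cls == existing_norm) then (2 : Int) else 0)
  + (tags.countP (fun t => (pvTagClassB.find? (fun p => p.1 == PySem.Str.lower t)).map Prod.snd == some cls) : Int)
  + (match (pvSignalsB.find? (fun p => p.1 == cls)).map Prod.snd with
     | some terms => if terms.any (fun term => PySem.Str.isIn term combined) then (2 : Int) else 0
     | none => 0)

def score_therapeutic_class_py_alt (existing : String) (focus_tags : String) (mesh_terms : List String) : String :=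
  let existing_norm := PySem.Str.lower (PySem.Str.strip existing)
  let valid := (!(existing_norm == "")) && (!(["unknown", "context_classified", "na"].contains existing_norm))
  let tags := ((PySem.Str.split? focus_tags ",").getD []).map PySem.Str.strip
  let combined := PySem.Str.strip (PySem.Str.lower (PySem.Str.join " "
    [PySem.Str.join " " (tags.filter (fun t => t ≠ "")), PySem.Str.join " " mesh_terms]))
  let cands := pvPriorityB ++
    (if valid && !(pvPriorityB.contains existing_norm) then [existing_norm] else [])
  let scored := cands.map (fun c => (c, pvScoreB valid existing_norm tags combined c))
  -- max(..., default=0)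
  let top := (PySem.List.max? (scored.map Prod.snd) (fun v => v)).getD 0
  if top == 0 then
    (if existing_norm ≠ "" then existing_norm else "context_classified")
  else
    -- min(..., key=rank) on a nonempty list; the .getD "" default is unreachable
    (PySem.List.min? ((scored.filter (fun p => p.2 == top)).map Prod.fst) (fun c => pvRankB c)).getD ""

-- ===== PRECONDITION & SPEC =====
def Spec_score_therapeutic_class_py (existing : String) (focus_tags : String) (mesh_terms : List String) (out : String) : Prop := out = score_therapeutic_class_py_alt existing focus_tags mesh_terms
instance (existing : String) (focus_tags : String) (mesh_terms : List String) (out : String) : Decidable (Spec_score_therapeutic_class_py existing focus_tags mesh_terms out) := by unfold Spec_score_therapeutic_class_py; infer_instance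

-- ===== CLAIM (what is proved, stated in full; the proofs are below) =====
def Claim_equal_score_therapeutic_class_py : Prop := ∀ (existing : String) (focus_tags : String) (mesh_terms : List String), Dom_score_therapeutic_class_py existing focus_tags mesh_terms → Spec_score_therapeutic_class_py existing focus_tags mesh_terms (score_therapeutic_class_py existing focus_tags mesh_terms)

-- ===== LEMMAS AND PROOFS =====

-- Proof-side structured views of the two ports (each is definitionally equal to its port).

def pvE (existing : String) : String := PySem.Str.lower (PySem.Str.strip existing)

def pvCondE (e : String) : Prop :=
  e ≠ "" ∧ ¬ (["unknown", "context_classified", "na"].contains e)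

def pvValid (e : String) : Bool :=
  (!(e == "")) && (!(["unknown", "context_classified", "na"].contains e))

def pvTs (ft : String) : List String := (PySem.Str.split? ft ",").getD []

def pvCombinedA (ft : String) (mt : List String) : String :=
  PySem.Str.strip (PySem.Str.join " "
    [PySem.Str.lower (PySem.Str.join " " (((pvTs ft).map PySem.Str.strip).filter (fun t => t ≠ ""))),
     PySem.Str.lower (PySem.Str.join " " mt)])

def pvCombinedB (ft : String) (mt : List String) : String :=
  PySem.Str.strip (PySem.Str.lower (PySem.Str.join " "
    [PySem.Str.join " " ((((pvTs ft).map PySem.Str.strip)).filter (fun t => t ≠ "")),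
     PySem.Str.join " " mt]))

def pvD0 (e : String) : PySem.Dict String Int :=
  if e ≠ "" ∧ ¬ (["unknown", "context_classified", "na"].contains e) then
    PySem.Dict.empty.insert e (PySem.Dict.empty.getD e 0 + 2)
  else PySem.Dict.empty

def pvStepMesh (combined : String) (d : PySem.Dict String Int) (p : String × List String) :
    PySem.Dict String Int :=
  if p.2.any (fun term => PySem.Str.isIn term combined) then
    d.insert p.1 (d.getD p.1 0 + 2)
  else d

def pvD2 (existing ft : String) (mt : List String) : PySem.Dict String Int :=
  pvMeshSignalsA.foldl (pvStepMesh (pvCombinedA ft mt))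
    ((pvTs ft).foldl pvTagStepA (pvD0 (pvE existing)))

def pvTagPred (c : String) (t : String) : Bool :=
  (pvTagToClassA.find? (fun p => p.1 == PySem.Str.lower (PySem.Str.strip t))).map Prod.snd == some c

def pvMBonus (ms : List (String × List String)) (combined : String) (c : String) : Int :=
  match ms.find? (fun p => p.1 == c) with
  | some p => if p.2.any (fun term => PySem.Str.isIn term combined) then 2 else 0
  | none => 0

def pvSc (existing ft : String) (mt : List String) (c : String) : Int :=
  pvScoreB (pvValid (pvE existing)) (pvE existing) ((pvTs ft).map PySem.Str.strip)
    (pvCombinedB ft mt) c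

def pvCands (existing : String) : List String :=
  pvPriorityB ++
    (if pvValid (pvE existing) && !(pvPriorityB.contains (pvE existing)) then [pvE existing] else [])

lemma portA_unfold (existing ft : String) (mt : List String) :
    score_therapeutic_class_py existing ft mt =
      (let e := pvE existing
       let d2 := pvD2 existing ft mt
       if d2.items = [] then (if e ≠ "" then e else "context_classified")
       else
         let maxScore := (PySem.List.max? d2.values (fun v => v)).getD 0
         let candidates := PySem.Set.ofList ((d2.items.filter (fun p => p.2 == maxScore)).map Prod.fst)
         match pvPriorityA.find? (fun cls => PySem.Set.contains candidates cls) with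
         | some cls => cls
         | none => ((PySem.List.pyGet? (PySem.List.sorted candidates (fun x => x) false) 0).getD "")) := by
  simp only [score_therapeutic_class_py]
  rw [show (pvMeshSignalsA.foldl (fun (d : PySem.Dict String Int) p =>
        if p.2.any (fun term => PySem.Str.isIn term
            (PySem.Str.strip (PySem.Str.join " "
              [PySem.Str.lower (PySem.Str.join " "
                ((((PySem.Str.split? ft ",").getD []).map PySem.Str.strip).filter (fun t => t ≠ ""))),
               PySem.Str.lower (PySem.Str.join " " mt)]))) then
          d.insert p.1 (d.getD p.1 0 + 2)
        else d)
      (((PySem.Str.split? ft ",").getD []).foldl pvTagStepA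
        (if PySem.Str.lower (PySem.Str.strip existing) ≠ "" ∧
            ¬ (["unknown", "context_classified", "na"].contains (PySem.Str.lower (PySem.Str.strip existing))) then
           (PySem.Dict.empty : PySem.Dict String Int).insert (PySem.Str.lower (PySem.Str.strip existing))
             ((PySem.Dict.empty : PySem.Dict String Int).getD (PySem.Str.lower (PySem.Str.strip existing)) 0 + 2)
         else PySem.Dict.empty))) = pvD2 existing ft mt from rfl]
  rfl

lemma portB_unfold (existing ft : String) (mt : List String) :
    score_therapeutic_class_py_alt existing ft mt =
      (let e := pvE existing
       let scored := (pvCands existing).map (fun c => (c, pvSc existing ft mt c))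
       let top := (PySem.List.max? (scored.map Prod.snd) (fun v => v)).getD 0
       if top == 0 then (if e ≠ "" then e else "context_classified")
       else
         (PySem.List.min? ((scored.filter (fun p => p.2 == top)).map Prod.fst)
           (fun c => pvRankB c)).getD "") := rfl

lemma valid_iff (e : String) : pvValid e = true ↔ pvCondE e := by
  simp [pvValid, pvCondE]

lemma combined_eq (ft : String) (mt : List String) : pvCombinedA ft mt = pvCombinedB ft mt := by
  apply String.toList_inj.mp
  simp [pvCombinedA, pvCombinedB, PySem.Chars.join_cons_cons, PySem.Chars.join_singleton,
    PySem.Chars.lower, show PySem.Chars.lowerChar ' ' = ' ' from by decide]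

-- the tag loop: each class's value grows by the number of tags mapped to it
lemma tagfold_getD (ts : List String) (d : PySem.Dict String Int) (c : String) :
    ((ts.foldl pvTagStepA d).getD c 0) = d.getD c 0 + (ts.countP (pvTagPred c) : Int) := by
  induction ts generalizing d with
  | nil => simp
  | cons t ts ih =>
    rw [List.foldl_cons, ih, List.countP_cons]
    unfold pvTagStepA pvTagPred
    cases hf : pvTagToClassA.find? (fun p => p.1 == PySem.Str.lower (PySem.Str.strip t)) with
    | none => simp [hf]
    | some p =>
      simp only [hf, Option.map_some]
      by_cases hc : p.2 = c
      · simp [hc]; ring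
      · simp [PySem.Dict.getD_insert, hc, Ne.symm hc]

-- the mesh loop over a list with distinct keys: lookup-style characterisation
lemma meshfold_getD (combined : String) (ms : List (String × List String))
    (hn : (ms.map Prod.fst).Nodup) (d : PySem.Dict String Int) (c : String) :
    ((ms.foldl (pvStepMesh combined) d).getD c 0) = d.getD c 0 + pvMBonus ms combined c := by
  induction ms generalizing d with
  | nil => simp [pvMBonus]
  | cons p ms ih =>
    rw [List.map_cons] at hn
    have hp1 : p.1 ∉ ms.map Prod.fst := (List.nodup_cons.mp hn).1
    have hn' : (ms.map Prod.fst).Nodup := (List.nodup_cons.mp hn).2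
    rw [List.foldl_cons, ih hn']
    by_cases hc : p.1 = c
    · subst hc
      have hfind : ms.find? (fun q => q.1 == p.1) = none := by
        apply List.find?_eq_none.mpr
        intro q hq
        simp only [beq_iff_eq]
        intro hqc
        exact hp1 (hqc ▸ List.mem_map_of_mem hq)
      have h0 : pvMBonus ms combined p.1 = 0 := by simp [pvMBonus, hfind]
      rw [show pvMBonus (p :: ms) combined p.1 =
        (if p.2.any (fun term => PySem.Str.isIn term combined) then 2 else 0) from by
          simp [pvMBonus]]
      unfold pvStepMesh
      by_cases hany : (p.2.any (fun term => PySem.Str.isIn term combined)) = true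
      · rw [if_pos hany, if_pos hany, PySem.Dict.getD_insert, if_pos rfl, h0, add_zero]
      · rw [if_neg hany, if_neg hany, h0, add_zero]
    · rw [show pvMBonus (p :: ms) combined c = pvMBonus ms combined c from by
        simp [pvMBonus, hc]]
      unfold pvStepMesh
      by_cases hany : (p.2.any (fun term => PySem.Str.isIn term combined)) = true
      · rw [if_pos hany, PySem.Dict.getD_insert, if_neg (fun h => hc h.symm)]
      · rw [if_neg hany]

-- one invariant lemma for both score-accumulating loops
lemma dict_fold_inv {β : Type} (Q : String → Prop) (l : List β)
    (step : PySem.Dict String Int → β → PySem.Dict String Int) :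
    ∀ (d : PySem.Dict String Int),
      (∀ d' x, x ∈ l → step d' x = d' ∨
        ∃ k a, Q k ∧ 0 < a ∧ step d' x = d'.insert k (d'.getD k 0 + a)) →
      ((∀ c, d.contains c = true → 0 < d.getD c 0 ∧ Q c) ∧ d.keys.Nodup) →
      ((∀ c, (l.foldl step d).contains c = true → 0 < (l.foldl step d).getD c 0 ∧ Q c) ∧
        (l.foldl step d).keys.Nodup) := by
  induction l with
  | nil => intro d _ hbase; exact hbase
  | cons x l ih =>
    intro d hstep hbase
    rw [List.foldl_cons]
    apply ih _ (fun d' x hx => hstep d' x (List.mem_cons_of_mem _ hx))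
    rcases hstep d x (List.mem_cons_self ..) with h | ⟨k, a, hQ, ha, h⟩
    · rw [h]; exact hbase
    · rw [h]
      refine ⟨?_, PySem.Dict.nodup_keys_insert _ _ _ hbase.2⟩
      intro c hc
      by_cases hck : c = k
      · subst hck
        rw [PySem.Dict.getD_insert, if_pos rfl]
        have hge : 0 ≤ d.getD c 0 := by
          by_cases hcon : d.contains c = true
          · exact le_of_lt (hbase.1 c hcon).1
          · rw [PySem.Dict.getD_of_not_contains d 0 (by simpa using hcon)]
        exact ⟨by omega, hQ⟩
      · rw [PySem.Dict.getD_insert, if_neg hck]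
        apply hbase.1 c
        rw [PySem.Dict.contains_insert] at hc
        rcases Bool.or_eq_true_iff.mp hc with h' | h'
        · exact absurd (beq_iff_eq.mp h') hck
        · exact h'

lemma d0_getD (e c : String) :
    (pvD0 e).getD c 0 = if pvValid e && (c == e) then 2 else 0 := by
  unfold pvD0
  by_cases hce : e ≠ "" ∧ ¬ (["unknown", "context_classified", "na"].contains e)
  · rw [if_pos hce]
    have hv : pvValid e = true := (valid_iff e).mpr hce
    by_cases hc : c = e
    · simp [hc, hv]
    · simp [hc, hv, PySem.Dict.getD_insert]
  · rw [if_neg hce]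
    have hv : pvValid e = false := by
      rcases Bool.eq_false_or_eq_true (pvValid e) with h | h
      · exact absurd ((valid_iff e).mp h) hce
      · exact h
    simp [hv]

lemma d0_base (e : String) :
    (∀ c, (pvD0 e).contains c = true →
        0 < (pvD0 e).getD c 0 ∧ ((pvCondE e ∧ c = e) ∨ c ∈ pvPriorityA)) ∧
      (pvD0 e).keys.Nodup := by
  unfold pvD0
  by_cases hce : e ≠ "" ∧ ¬ (["unknown", "context_classified", "na"].contains e)
  · rw [if_pos hce]
    constructor
    · intro c hc
      rw [PySem.Dict.contains_insert] at hc
      rcases Bool.or_eq_true_iff.mp hc with h | h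
      · have hceq : c = e := beq_iff_eq.mp h
        subst hceq
        constructor
        · simp
        · exact Or.inl ⟨hce, rfl⟩
      · simp at h
    · exact PySem.Dict.nodup_keys_insert _ _ _ PySem.Dict.nodup_keys_empty
  · rw [if_neg hce]
    exact ⟨fun c hc => by simp at hc, PySem.Dict.nodup_keys_empty⟩

-- the two invariants of the finished dict: positive values, and keys drawn from
-- the normalised existing class plus the nine known classes
lemma d2_inv (existing ft : String) (mt : List String) :
    (∀ c, (pvD2 existing ft mt).contains c = true →
        0 < (pvD2 existing ft mt).getD c 0 ∧
          ((pvCondE (pvE existing) ∧ c = pvE existing) ∨ c ∈ pvPriorityA)) ∧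
      (pvD2 existing ft mt).keys.Nodup := by
  unfold pvD2
  apply dict_fold_inv
  · intro d p hp
    unfold pvStepMesh
    by_cases hany : (p.2.any (fun term => PySem.Str.isIn term (pvCombinedA ft mt))) = true
    · rw [if_pos hany]
      right
      refine ⟨p.1, 2, Or.inr ?_, by norm_num, rfl⟩
      have : ∀ q ∈ pvMeshSignalsA, q.1 ∈ pvPriorityA := by decide
      exact this p hp
    · rw [if_neg hany]
      exact Or.inl rfl
  · apply dict_fold_inv
    · intro d tag _
      unfold pvTagStepA
      cases hf : pvTagToClassA.find? (fun p => p.1 == PySem.Str.lower (PySem.Str.strip tag)) with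
      | none => simp [hf]
      | some p =>
        simp only [hf]
        right
        refine ⟨p.2, 1, Or.inr ?_, by norm_num, rfl⟩
        have hmem : p ∈ pvTagToClassA := List.mem_of_find?_eq_some hf
        have : ∀ q ∈ pvTagToClassA, q.2 ∈ pvPriorityA := by decide
        exact this p hmem
    · exact d0_base (pvE existing)

lemma mesh_nodup : (pvMeshSignalsA.map Prod.fst).Nodup := by decide

-- the finished dict's value at any class is exactly B's per-class score
lemma d2_getD (existing ft : String) (mt : List String) (c : String) :
    (pvD2 existing ft mt).getD c 0 = pvSc existing ft mt c := by
  have hcount : (((pvTs ft).map PySem.Str.strip).countP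
      (fun t => (pvTagClassB.find? (fun p => p.1 == PySem.Str.lower t)).map Prod.snd == some c))
      = (pvTs ft).countP (pvTagPred c) := by
    rw [List.countP_map]
    apply List.countP_congr
    intro t _
    simp [pvTagPred, Function.comp, show pvTagClassB = pvTagToClassA from rfl]
  have hmb : pvMBonus pvMeshSignalsA (pvCombinedB ft mt) c =
      (match (pvSignalsB.find? (fun p => p.1 == c)).map Prod.snd with
       | some terms => if terms.any (fun term => PySem.Str.isIn term (pvCombinedB ft mt)) then (2:Int) else 0
       | none => 0) := by
    rw [show pvSignalsB = pvMeshSignalsA from rfl]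
    unfold pvMBonus
    cases hf : pvMeshSignalsA.find? (fun p => p.1 == c) with
    | none => simp
    | some p => simp
  unfold pvD2
  rw [meshfold_getD _ _ mesh_nodup, tagfold_getD, d0_getD, combined_eq, hmb]
  unfold pvSc pvScoreB
  rw [← hcount]

lemma contains_d2_of_sc_pos (existing ft : String) (mt : List String) (c : String)
    (h : 0 < pvSc existing ft mt c) : (pvD2 existing ft mt).contains c = true := by
  by_contra hc
  have h0 : (pvD2 existing ft mt).getD c 0 = 0 :=
    PySem.Dict.getD_of_not_contains _ _ (Bool.not_eq_true _ ▸ hc)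
  rw [d2_getD] at h0
  omega

lemma sc_pos_mem_cands (existing ft : String) (mt : List String) (c : String)
    (h : 0 < pvSc existing ft mt c) : c ∈ pvCands existing := by
  have hcon := contains_d2_of_sc_pos existing ft mt c h
  rcases ((d2_inv existing ft mt).1 c hcon).2 with ⟨hce, rfl⟩ | hp
  · unfold pvCands
    by_cases hpe : pvPriorityB.contains (pvE existing) = true
    · exact List.mem_append_left _ (by simpa using hpe)
    · apply List.mem_append_right
      rw [if_pos (by
        rw [Bool.and_eq_true]
        exact ⟨(valid_iff _).mpr hce, by simpa using hpe⟩)]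
      exact List.mem_singleton.mpr rfl
  · exact List.mem_append_left _ (by rw [show pvPriorityB = pvPriorityA from rfl]; exact hp)

lemma nodup_all_eq_singleton {α : Type} (l : List α) (hl : l.Nodup) (e : α)
    (he : e ∈ l) (hall : ∀ x ∈ l, x = e) : l = [e] := by
  cases l with
  | nil => cases he
  | cons a t =>
    have ha : a = e := hall a (List.mem_cons_self ..)
    subst ha
    cases t with
    | nil => rfl
    | cons b t2 =>
      exfalso
      have hb : b = a := hall b (List.mem_cons_of_mem _ (List.mem_cons_self ..))
      exact (List.nodup_cons.mp hl).1 (hb ▸ List.mem_cons_self ..)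

-- ===== VERDICT (by name: the statement is the Claim_ definition above) =====
set_option maxHeartbeats 2000000 in
theorem score_therapeutic_class_py_spec : Claim_equal_score_therapeutic_class_py := by
  intro existing ft mt _
  unfold Spec_score_therapeutic_class_py
  rw [portA_unfold, portB_unfold]
  simp only []
  have hscd : ∀ c, (pvD2 existing ft mt).getD c 0 = pvSc existing ft mt c :=
    d2_getD existing ft mt
  have hpos : ∀ c, (pvD2 existing ft mt).contains c = true → 0 < pvSc existing ft mt c := by
    intro c hc
    have h := ((d2_inv existing ft mt).1 c hc).1
    rw [hscd c] at h
    exact h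
  have hQ : ∀ c, (pvD2 existing ft mt).contains c = true →
      (pvCondE (pvE existing) ∧ c = pvE existing) ∨ c ∈ pvPriorityA :=
    fun c hc => ((d2_inv existing ft mt).1 c hc).2
  have hnodup : (pvD2 existing ft mt).keys.Nodup := (d2_inv existing ft mt).2
  by_cases hitems : (pvD2 existing ft mt).items = []
  · -- A returns the fallback; every score is 0, so B's top is 0
    rw [if_pos hitems]
    have hallz : ∀ c, pvSc existing ft mt c = 0 := by
      intro c
      have hc : (pvD2 existing ft mt).contains c = false := by
        rcases Bool.eq_false_or_eq_true ((pvD2 existing ft mt).contains c) with h | h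
        swap
        · exact h
        · exfalso
          have := (PySem.Dict.contains_iff_mem_keys _ _).mp h
          simp only [PySem.Dict.keys, hitems, List.map_nil] at this
          cases this
      have h0 := PySem.Dict.getD_of_not_contains (pvD2 existing ft mt) (0:Int) hc
      rw [hscd c] at h0
      exact h0
    have htop : (PySem.List.max? (((pvCands existing).map
        (fun c => (c, pvSc existing ft mt c))).map Prod.snd) (fun v => v)).getD 0 = 0 := by
      cases hmx : PySem.List.max? (((pvCands existing).map
          (fun c => (c, pvSc existing ft mt c))).map Prod.snd) (fun v => v) with
      | none => rfl
      | some m =>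
        have hmem := PySem.List.max?_mem hmx
        simp only [List.map_map, List.mem_map, Function.comp] at hmem
        obtain ⟨c, _, hc⟩ := hmem
        simp only [Option.getD_some, ← hc, hallz c]
    rw [htop]
    rfl
  · rw [if_neg hitems]
    obtain ⟨pr, hpr⟩ : ∃ p, p ∈ (pvD2 existing ft mt).items := List.exists_mem_of_ne_nil _ hitems
    have hk : (pvD2 existing ft mt).contains pr.1 = true :=
      (PySem.Dict.contains_iff_mem_keys _ _).mpr (PySem.Dict.mem_keys_of_mem_items _ hpr)
    have hscp : 0 < pvSc existing ft mt pr.1 := hpos _ hk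
    have hmemcands : pr.1 ∈ pvCands existing := sc_pos_mem_cands existing ft mt _ hscp
    have hvmem : pvSc existing ft mt pr.1 ∈ (((pvCands existing).map
        (fun c => (c, pvSc existing ft mt c))).map Prod.snd) := by
      simp only [List.map_map, List.mem_map, Function.comp]
      exact ⟨pr.1, hmemcands, rfl⟩
    cases hmx : PySem.List.max? (((pvCands existing).map
        (fun c => (c, pvSc existing ft mt c))).map Prod.snd) (fun v => v) with
    | none =>
      rw [PySem.List.max?_eq_none_iff] at hmx
      rw [hmx] at hvmem
      cases hvmem
    | some m =>
    have hmx_max := PySem.List.max?_isMax hmx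
    have hm_pos : 0 < m := lt_of_lt_of_le hscp (hmx_max _ hvmem)
    simp only [Option.getD_some]
    have hbne : ((m == (0:Int))) = false := by
      rw [beq_eq_false_iff_ne]
      omega
    rw [if_neg (by rw [hbne]; exact Bool.false_ne_true)]
    -- A's max over the dict values is the same m
    have hvne : (pvD2 existing ft mt).values ≠ [] := by
      intro h
      apply hitems
      have : (pvD2 existing ft mt).items.map Prod.snd = [] := h
      exact List.map_eq_nil_iff.mp this
    cases hMx : PySem.List.max? (pvD2 existing ft mt).values (fun v => v) with
    | none => exact absurd (PySem.List.max?_eq_none_iff _ _ |>.mp hMx) hvne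
    | some M =>
    have hMx_mem := PySem.List.max?_mem hMx
    have hMx_max := PySem.List.max?_isMax hMx
    have hMm : M = m := by
      have h1 : M ≤ m := by
        obtain ⟨q, hq, hq2⟩ := List.mem_map.mp hMx_mem
        have hgd : (pvD2 existing ft mt).getD q.1 0 = q.2 := by
          have : (q.1, q.2) ∈ (pvD2 existing ft mt).items := by simpa using hq
          exact PySem.Dict.getD_of_mem_items _ this hnodup 0
        have hsq : pvSc existing ft mt q.1 = M := by rw [← hscd, hgd, hq2]
        have hqpos : 0 < pvSc existing ft mt q.1 := by
          apply hpos
          exact (PySem.Dict.contains_iff_mem_keys _ _).mpr (PySem.Dict.mem_keys_of_mem_items _ hq)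
        have hqc : q.1 ∈ pvCands existing := sc_pos_mem_cands existing ft mt _ (by omega)
        have : pvSc existing ft mt q.1 ∈ (((pvCands existing).map
            (fun c => (c, pvSc existing ft mt c))).map Prod.snd) := by
          simp only [List.map_map, List.mem_map, Function.comp]
          exact ⟨q.1, hqc, rfl⟩
        have := hmx_max _ this
        omega
      have h2 : m ≤ M := by
        obtain ⟨c, hc, hc2⟩ : ∃ c, c ∈ pvCands existing ∧ pvSc existing ft mt c = m := by
          have := PySem.List.max?_mem hmx
          simp only [List.map_map, List.mem_map, Function.comp] at this
          obtain ⟨c, hcc, hc2⟩ := this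
          exact ⟨c, hcc, hc2⟩
        have hcon : (pvD2 existing ft mt).contains c = true :=
          contains_d2_of_sc_pos existing ft mt c (by omega)
        have hkeys := (PySem.Dict.contains_iff_mem_keys _ _).mp hcon
        simp only [PySem.Dict.keys, List.mem_map] at hkeys
        obtain ⟨q, hq, hq1⟩ := hkeys
        have hgd : (pvD2 existing ft mt).getD q.1 0 = q.2 := by
          have : (q.1, q.2) ∈ (pvD2 existing ft mt).items := by simpa using hq
          exact PySem.Dict.getD_of_mem_items _ this hnodup 0
        have hq2m : q.2 = m := by
          rw [← hgd, hq1, hscd, hc2]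
        have : q.2 ∈ (pvD2 existing ft mt).values := by
          exact List.mem_map_of_mem hq
        have := hMx_max _ this
        omega
      omega
    simp only [Option.getD_some]
    rw [hMm]
    -- membership in A's candidate set and B's candidate list agree: score = m
    have hCmem : ∀ c, c ∈ PySem.Set.ofList
        (((pvD2 existing ft mt).items.filter (fun p => p.2 == m)).map Prod.fst) ↔
        pvSc existing ft mt c = m := by
      intro c
      rw [PySem.Set.mem_ofList]
      constructor
      · intro h
        obtain ⟨q, hq, hq1⟩ := List.mem_map.mp h
        obtain ⟨hqi, hq2⟩ := List.mem_filter.mp hq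
        have hgd : (pvD2 existing ft mt).getD q.1 0 = q.2 := by
          have : (q.1, q.2) ∈ (pvD2 existing ft mt).items := by simpa using hqi
          exact PySem.Dict.getD_of_mem_items _ this hnodup 0
        rw [← hq1, ← hscd, hgd]
        exact beq_iff_eq.mp hq2
      · intro h
        have hcon : (pvD2 existing ft mt).contains c = true :=
          contains_d2_of_sc_pos existing ft mt c (by omega)
        have hkeys := (PySem.Dict.contains_iff_mem_keys _ _).mp hcon
        simp only [PySem.Dict.keys, List.mem_map] at hkeys
        obtain ⟨q, hq, hq1⟩ := hkeys
        have hgd : (pvD2 existing ft mt).getD q.1 0 = q.2 := by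
          have : (q.1, q.2) ∈ (pvD2 existing ft mt).items := by simpa using hq
          exact PySem.Dict.getD_of_mem_items _ this hnodup 0
        apply List.mem_map.mpr
        refine ⟨q, List.mem_filter.mpr ⟨hq, ?_⟩, hq1⟩
        rw [beq_iff_eq, ← hgd, hq1, hscd, h]
    have hLmem : ∀ c, c ∈ (((pvCands existing).map
        (fun c => (c, pvSc existing ft mt c))).filter (fun p => p.2 == m)).map Prod.fst ↔
        pvSc existing ft mt c = m := by
      intro c
      constructor
      · intro h
        obtain ⟨q, hq, hq1⟩ := List.mem_map.mp h
        obtain ⟨hqm, hq2⟩ := List.mem_filter.mp hq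
        obtain ⟨c', _, hc'⟩ := List.mem_map.mp hqm
        rw [← hc'] at hq2 hq1
        simp only at hq2 hq1
        rw [← hq1]
        exact beq_iff_eq.mp hq2
      · intro h
        apply List.mem_map.mpr
        refine ⟨(c, pvSc existing ft mt c), List.mem_filter.mpr ⟨?_, by rw [beq_iff_eq]; exact h⟩, rfl⟩
        exact List.mem_map_of_mem (sc_pos_mem_cands existing ft mt c (by omega))
    -- B's min? is well-defined
    have hprioAB : pvPriorityA = pvPriorityB := rfl
    cases hfind : pvPriorityA.find? (fun cls =>
        (PySem.Set.ofList (((pvD2 existing ft mt).items.filter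
          (fun p => p.2 == m)).map Prod.fst)).contains cls) with
    | some p =>
      dsimp only
      obtain ⟨hpredp, as, bs, happ, hnotas⟩ := List.find?_eq_some_iff_append.mp hfind
      have hscp' : pvSc existing ft mt p = m :=
        (hCmem p).mp ((PySem.Set.contains_iff _ _).mp hpredp)
      have hpmem : p ∈ (((pvCands existing).map
          (fun c => (c, pvSc existing ft mt c))).filter (fun p => p.2 == m)).map Prod.fst :=
        (hLmem p).mpr hscp'
      cases hmn : PySem.List.min? ((((pvCands existing).map
          (fun c => (c, pvSc existing ft mt c))).filter (fun p => p.2 == m)).map Prod.fst)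
          (fun c => pvRankB c) with
      | none =>
        rw [PySem.List.min?_eq_none_iff] at hmn
        rw [hmn] at hpmem
        cases hpmem
      | some mn =>
      simp only [Option.getD_some]
      have hmnmem := PySem.List.min?_mem hmn
      have hmnmin := PySem.List.min?_isMin hmn
      have hscmn : pvSc existing ft mt mn = m := (hLmem mn).mp hmnmem
      have hpnotas : p ∉ as := by
        intro hin
        have := hnotas p hin
        rw [hpredp] at this
        simp at this
      have hrankp : pvRankB p = as.length := by
        unfold pvRankB
        rw [show PySem.List.index? pvPriorityB p = some as.length from
          (PySem.List.index?_eq_some_iff _ _ _).mpr ⟨as, bs, by rw [← hprioAB, happ], rfl, hpnotas⟩]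
      have hlen : pvPriorityB.length = as.length + bs.length + 1 := by
        rw [← hprioAB, happ]
        simp [List.length_append]
        omega
      have hranklt := hmnmin _ hpmem
      rw [hrankp] at hranklt
      -- identify mn with p
      cases hidx : PySem.List.index? pvPriorityB mn with
      | none =>
        exfalso
        have hrmn : pvRankB mn = pvPriorityB.length := by unfold pvRankB; rw [hidx]
        rw [hrmn] at hranklt
        omega
      | some i =>
        obtain ⟨pre, suf, happ2, hlenpre, hprenot⟩ := (PySem.List.index?_eq_some_iff _ _ _).mp hidx
        have hrankmn : pvRankB mn = i := by unfold pvRankB; rw [hidx]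
        rw [hrankmn] at hranklt
        by_cases hlt : i < as.length
        · exfalso
          -- mn would be an earlier priority entry that the find? loop rejected
          have hBapp : pvPriorityB = as ++ p :: bs := hprioAB ▸ happ
          have hmn_as : mn ∈ as := by
            have h1 : pvPriorityB[i]'(by omega) = mn := by
              have hEq := List.getElem_of_eq happ2 (i := i) (by omega)
              rw [hEq, List.getElem_append_right (by omega)]
              simp [hlenpre]
            have h2 : pvPriorityB[i]'(by omega) ∈ as := by
              have hEq := List.getElem_of_eq hBapp (i := i) (by omega)
              rw [hEq, List.getElem_append_left (by omega)]
              exact List.getElem_mem _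
            rw [h1] at h2
            exact h2
          have := hnotas mn hmn_as
          have hcmn : (PySem.Set.ofList (((pvD2 existing ft mt).items.filter
              (fun p => p.2 == m)).map Prod.fst)).contains mn = true :=
            (PySem.Set.contains_iff _ _).mpr ((hCmem mn).mpr hscmn)
          rw [hcmn] at this
          simp at this
        · have hieq : i = as.length := by omega
          subst hieq
          have := List.append_inj (by rw [← happ2, ← hprioAB, happ]) hlenpre
          have hmp : mn = p := by
            have h2 := this.2
            simp only [List.cons.injEq] at h2
            exact h2.1
          rw [hmp]
    | none =>
      dsimp only
      have hnotin : ∀ x ∈ pvPriorityA, ¬ ((PySem.Set.ofList (((pvD2 existing ft mt).items.filter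
          (fun p => p.2 == m)).map Prod.fst)).contains x = true) := by
        intro x hx hcx
        have := List.find?_eq_none.mp hfind x hx
        rw [hcx] at this
        simp at this
      -- some class attains m, and it cannot be a priority class, so it is existing_norm
      obtain ⟨c0, hc0c, hc0⟩ : ∃ c, c ∈ pvCands existing ∧ pvSc existing ft mt c = m := by
        have := PySem.List.max?_mem hmx
        simp only [List.map_map, List.mem_map, Function.comp] at this
        obtain ⟨c, hcc, hc2⟩ := this
        exact ⟨c, hcc, hc2⟩
      have honly : ∀ c, pvSc existing ft mt c = m → c = pvE existing := by
        intro c hc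
        have hcon : (pvD2 existing ft mt).contains c = true :=
          contains_d2_of_sc_pos existing ft mt c (by omega)
        rcases hQ c hcon with ⟨_, h⟩ | h
        · exact h
        · exact absurd ((PySem.Set.contains_iff _ _).mpr ((hCmem c).mpr hc)) (hnotin c h)
      have he0 : pvSc existing ft mt (pvE existing) = m := (honly c0 hc0) ▸ hc0
      have hsing : PySem.Set.ofList (((pvD2 existing ft mt).items.filter
          (fun p => p.2 == m)).map Prod.fst) = [pvE existing] := by
        apply nodup_all_eq_singleton _ (PySem.Set.nodup_ofList _)
        · exact (hCmem _).mpr he0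
        · intro x hx
          exact honly x ((hCmem x).mp hx)
      rw [hsing]
      rw [PySem.List.sorted_eq_self_of_pairwise _ _ (List.pairwise_singleton _ _)]
      -- B's min over the candidate list, every member of which is existing_norm
      cases hmn : PySem.List.min? ((((pvCands existing).map
          (fun c => (c, pvSc existing ft mt c))).filter (fun p => p.2 == m)).map Prod.fst)
          (fun c => pvRankB c) with
      | none =>
        rw [PySem.List.min?_eq_none_iff] at hmn
        have := (hLmem (pvE existing)).mpr he0
        rw [hmn] at this
        cases this
      | some mn =>
        simp only [Option.getD_some]
        have hscmn : pvSc existing ft mt mn = m := (hLmem mn).mp (PySem.List.min?_mem hmn)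
        rw [honly mn hscmn]
        simp [PySem.List.pyGet?, PySem.List.pyIdx?]
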